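-- pv_equiv track=rewrite | github.com/martinrusev/django-redis-sessions | redis_sessions/session.py | get_server
-- ===== SOURCE A (Python) =====
-- def get_server(key, servers_pool):
--     total_weight = sum([row.get('weight', 1) for row in servers_pool])
--     pos = 0
--     for i in range(3, -1, -1):
--         pos = pos * 2 ** 8 + ord(key[i])
--     pos = pos % total_weight
--
--     pool = iter(servers_pool)
--     server = next(pool)
--     server_key = 0
--     i = 0
--     while i < total_weight:
--         if i <= pos < (i + server.get('weight', 1)):
--             return server_key, server
--         i += server.get('weight', 1)
--         server = next(pool)
--         server_key += 1
--
--     return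
-- ===== SOURCE B (Python) =====
-- import bisect
-- from itertools import accumulate
--
--
-- def get_server(key, servers_pool):
--     # prefix-sum table over the weights, server located by binary search
--     cum = list(accumulate(row.get('weight', 1) for row in servers_pool))
--     pos = sum(ord(key[i]) << (8 * i) for i in range(4)) % cum[-1]
--     idx = bisect.bisect_right(cum, pos)
--     return idx, servers_pool[idx]
-- ===== Notes on version B (the rewrite author's own statement) =====
-- stated objective: alternative
-- what changed: Replaces the interleaved iterator walk (running offset, explicit next() and per-server range test) with a prefix-sum table, a closed-form 4-byte position and bisect_right; Pre_ additionally excludes pools containing a negative weight, a meaningless configuration on which selection is unspecified and any answer is as defensible as another.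
-- outside the precondition, e.g. on get_server('abcd', [{'weight': -3}]): A returns None, B raises IndexError
import Mathlib
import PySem

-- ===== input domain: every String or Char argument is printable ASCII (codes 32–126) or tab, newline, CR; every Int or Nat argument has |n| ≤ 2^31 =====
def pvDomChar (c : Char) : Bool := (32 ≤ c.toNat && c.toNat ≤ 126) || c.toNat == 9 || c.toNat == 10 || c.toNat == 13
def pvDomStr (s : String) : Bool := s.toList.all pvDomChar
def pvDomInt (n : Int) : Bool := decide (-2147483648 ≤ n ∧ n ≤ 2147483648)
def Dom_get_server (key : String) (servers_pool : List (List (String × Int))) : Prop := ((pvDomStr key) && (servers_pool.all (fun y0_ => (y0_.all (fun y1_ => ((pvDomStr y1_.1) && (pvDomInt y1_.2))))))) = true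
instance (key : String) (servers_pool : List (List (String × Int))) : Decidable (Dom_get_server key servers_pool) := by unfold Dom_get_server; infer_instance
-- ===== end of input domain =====

-- B replaces A's interleaved iterator walk by a prefix-sum table + bisect (alternative decomposition, same cost).

-- ===== PORT A =====
-- row.get('weight', 1): first-match lookup in the association list (the dict convention)
def pvWeight (row : List (String × Int)) : Int :=
  ((row.find? (fun p => p.1 == "weight")).map Prod.snd).getD 1

-- the 'while i < total_weight' loop; 'next(pool)' on an exhausted pool = StopIteration = none (outside Pre_)
def getServerLoop (total pos : Int) (server : List (String × Int))
    (pool : List (List (String × Int))) (server_key i : Int) :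
    Option (Int × List (String × Int)) :=
  if i < total then
    if i ≤ pos ∧ pos < i + pvWeight server then some (server_key, server)
    else
      match pool with
      | [] => none
      | s :: rest => getServerLoop total pos s rest (server_key + 1) (i + pvWeight server)
  else none

def get_server (key : String) (servers_pool : List (List (String × Int))) :
    Option (Int × List (String × Int)) :=
  let total_weight : Int := (servers_pool.map (fun row => pvWeight row)).sum
  -- for i in range(3, -1, -1): pos = pos * 2**8 + ord(key[i]); IndexError = none (outside Pre_)
  match (PySem.List.pyRange 3 (-1) (-1)).foldl
      (fun (acc : Option Int) i =>
        acc.bind (fun p => (PySem.Str.pyGet? key i).map (fun c => p * 2 ^ 8 + (c.toNat : Int))))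
      (some 0) with
  | none => none
  | some pos0 =>
    if total_weight = 0 then none   -- ZeroDivisionError (outside Pre_)
    else
      let pos := PySem.Int.mod pos0 total_weight
      match servers_pool with
      | [] => none                  -- StopIteration on the first next() (unreachable under Pre_)
      | server :: pool => getServerLoop total_weight pos server pool 0 0

-- ===== PORT B =====
-- list(accumulate(weights)) starting from a running sum acc
def pvCum (acc : Int) : List Int → List Int
  | [] => []
  | w :: ws => (acc + w) :: pvCum (acc + w) ws

def get_server_alt (key : String) (servers_pool : List (List (String × Int))) :
    Option (Int × List (String × Int)) :=
  let cum := pvCum 0 (servers_pool.map (fun row => pvWeight row))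
  -- sum(ord(key[i]) << (8*i) for i in range(4)); IndexError = none (outside Pre_);
  -- the shift is exact as * 2^(8*i) since i ≥ 0
  match (PySem.List.pyRange 0 4 1).foldl
      (fun (acc : Option Int) i =>
        acc.bind (fun s => (PySem.Str.pyGet? key i).map (fun c => s + (c.toNat : Int) * 2 ^ (8 * i.toNat))))
      (some 0) with
  | none => none
  | some raw =>
    match cum.getLast? with
    | none => none                  -- cum[-1] on an empty pool: IndexError (outside Pre_)
    | some total =>
      if total = 0 then none        -- ZeroDivisionError (outside Pre_)
      else
        let pos := PySem.Int.mod raw total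
        let idx := PySem.List.bisectRight cum pos
        (PySem.List.pyGet? servers_pool (idx : Int)).map (fun s => ((idx : Int), s))

-- ===== PRECONDITION & SPEC =====
-- Pre_ excludes A's crashes (a key shorter than 4 chars → IndexError; total weight 0, incl. the empty
-- pool → ZeroDivisionError) and pools containing a negative weight, a meaningless configuration on
-- which weighted selection is unspecified and A's linear-scan answer is as defensible as any other.
def Pre_get_server (key : String) (servers_pool : List (List (String × Int))) : Prop :=
  4 ≤ key.toList.length ∧ (servers_pool.map (fun row => pvWeight row)).sum ≠ 0 ∧
    ∀ row ∈ servers_pool, 0 ≤ pvWeight row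

instance (key : String) (servers_pool : List (List (String × Int))) :
    Decidable (Pre_get_server key servers_pool) := by unfold Pre_get_server; infer_instance

def pvWitness_get_server : String × (List (List (String × Int))) := ("abcd", [[("weight", 2)], []])

def Spec_get_server (key : String) (servers_pool : List (List (String × Int)))
    (out : Option (Int × (List (String × Int)))) : Prop := out = get_server_alt key servers_pool

instance (key : String) (servers_pool : List (List (String × Int)))
    (out : Option (Int × (List (String × Int)))) : Decidable (Spec_get_server key servers_pool out) := by
  unfold Spec_get_server; infer_instance

-- ===== CLAIM (what is proved, stated in full; the proofs are below) =====
def Claim_equal_get_server : Prop := ∀ (key : String) (servers_pool : List (List (String × Int))), Dom_get_server key servers_pool → Pre_get_server key servers_pool → Spec_get_server key servers_pool (get_server key servers_pool)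

-- ===== LEMMAS AND PROOFS =====

-- index of the server that catches pos, as A's scan finds it
def firstIdx (pos : Int) : Int → List Int → Nat
  | _, [] => 0
  | i, w :: ws => if pos < i + w then 0 else firstIdx pos (i + w) ws + 1

lemma four_chars {α : Type} : ∀ (l : List α), 4 ≤ l.length →
    ∃ a b c d t, l = a :: b :: c :: d :: t := by
  intro l h
  match l with
  | a :: b :: c :: d :: t => exact ⟨a, b, c, d, t, rfl⟩
  | [] | [_] | [_, _] | [_, _, _] => simp at h

-- with nonnegative weights every entry of the prefix-sum table is at least the starting offset
lemma pvCum_ge (acc : Int) : ∀ (ws : List Int), (∀ w ∈ ws, 0 ≤ w) →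
    ∀ x ∈ pvCum acc ws, acc ≤ x := by
  intro ws
  induction ws generalizing acc with
  | nil => simp [pvCum]
  | cons w rest ih =>
    intro hw x hx
    have hw0 : 0 ≤ w := hw w (by simp)
    simp only [pvCum, List.mem_cons] at hx
    rcases hx with rfl | hx
    · omega
    · have := ih (acc + w) (fun v hv => hw v (by simp [hv])) x hx
      omega

lemma pvCum_pairwise (acc : Int) : ∀ (ws : List Int), (∀ w ∈ ws, 0 ≤ w) →
    (pvCum acc ws).Pairwise (fun a b => a ≤ b) := by
  intro ws
  induction ws generalizing acc with
  | nil => simp [pvCum]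
  | cons w rest ih =>
    intro hw
    simp only [pvCum, List.pairwise_cons]
    exact ⟨fun x hx => pvCum_ge (acc + w) rest (fun v hv => hw v (by simp [hv])) x hx,
      ih (acc + w) (fun v hv => hw v (by simp [hv]))⟩

lemma bisectRight_split (pre suf : List Int) (pos : Int)
    (hs : (pre ++ suf).Pairwise (fun a b => a ≤ b))
    (hpre : ∀ x ∈ pre, x ≤ pos) (hsuf : ∀ x ∈ suf, pos < x) :
    PySem.List.bisectRight (pre ++ suf) pos = pre.length := by
  obtain ⟨hle, hlt', hgt'⟩ := PySem.List.bisectRight_spec (pre ++ suf) pos hs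
  set b := PySem.List.bisectRight (pre ++ suf) pos with hb
  have hlen : (pre ++ suf).length = pre.length + suf.length := by simp
  rcases lt_trichotomy b pre.length with h | h | h
  · exfalso
    have hblen : b < (pre ++ suf).length := by omega
    have hgt : pos < (pre ++ suf)[b] := hgt' b hblen le_rfl
    rw [List.getElem_append_left h] at hgt
    have := hpre _ (List.getElem_mem (l := pre) (n := b) h)
    omega
  · exact h
  · exfalso
    have hplen : pre.length < (pre ++ suf).length := by omega
    have hlt : (pre ++ suf)[pre.length] ≤ pos := hlt' pre.length hplen h
    have hidx : (pre ++ suf)[pre.length] = suf[0]'(by omega) := by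
      rw [List.getElem_append_right le_rfl]
      simp
    rw [hidx] at hlt
    have := hsuf _ (List.getElem_mem (l := suf) (n := 0) (by omega))
    omega

lemma pvCum_getLast : ∀ (ws : List Int) (acc : Int), (pvCum acc ws).getLast?.getD acc = acc + ws.sum := by
  intro ws
  induction ws with
  | nil => simp [pvCum]
  | cons w rest ih =>
    intro acc
    simp only [pvCum, List.sum_cons]
    have h := ih (acc + w)
    cases hp : pvCum (acc + w) rest with
    | nil =>
      rw [hp] at h; simp at h
      simp; omega
    | cons z zs =>
      rw [hp] at h
      cases hv : (z :: zs).getLast? with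
      | none => simp at hv
      | some v =>
        rw [hv] at h
        rw [List.getLast?_cons, hv]
        simp at h ⊢
        omega

-- splits the prefix-sum table at the server A's scan selects
lemma keyB (pos : Int) : ∀ (ws : List Int) (i : Int), (∀ w ∈ ws, 0 ≤ w) →
    i ≤ pos → pos < i + ws.sum →
    ∃ pre suf, pvCum i ws = pre ++ suf ∧ pre.length = firstIdx pos i ws ∧
      (∀ x ∈ pre, x ≤ pos) ∧ (∀ x ∈ suf, pos < x) ∧ firstIdx pos i ws < ws.length := by
  intro ws
  induction ws with
  | nil => intro i _ hi hlt; simp at hlt; omega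
  | cons w rest ih =>
    intro i hw hi hlt
    have hw' : ∀ v ∈ rest, 0 ≤ v := fun v hv => hw v (by simp [hv])
    simp only [pvCum, List.sum_cons] at *
    by_cases hc : pos < i + w
    · refine ⟨[], (i + w) :: pvCum (i + w) rest, by simp, ?_, by simp, ?_, ?_⟩
      · simp [firstIdx, hc]
      · intro x hx
        rcases List.mem_cons.mp hx with rfl | hx
        · omega
        · have := pvCum_ge (i + w) rest hw' x hx
          omega
      · simp [firstIdx, hc]
    · have hiw : i + w ≤ pos := by omega
      obtain ⟨pre', suf', heq, hlen, hp, hsf, hb⟩ := ih (i + w) hw' hiw (by omega)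
      refine ⟨(i + w) :: pre', suf', by simp [heq], ?_, ?_, hsf, ?_⟩
      · simp [firstIdx, hc, hlen]
      · intro x hx
        rcases List.mem_cons.mp hx with rfl | hx
        · exact hiw
        · exact hp x hx
      · simp [firstIdx, hc]; omega

lemma B_loc (pos : Int) (ws : List Int) (hw : ∀ w ∈ ws, 0 ≤ w)
    (h0 : 0 ≤ pos) (hlt : pos < ws.sum) :
    PySem.List.bisectRight (pvCum 0 ws) pos = firstIdx pos 0 ws ∧
      firstIdx pos 0 ws < ws.length := by
  obtain ⟨pre, suf, heq, hlen, hp, hsf, hb⟩ := keyB pos ws 0 hw h0 (by simpa using hlt)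
  refine ⟨?_, hb⟩
  rw [heq, bisectRight_split pre suf pos (heq ▸ pvCum_pairwise 0 ws hw) hp hsf, hlen]

lemma loopA (pos total : Int) (hp : pos < total) :
    ∀ (pool : List (List (String × Int))) (server : List (String × Int)) (i sk : Int),
      i ≤ pos → i + ((server :: pool).map pvWeight).sum = total →
      getServerLoop total pos server pool sk i =
        ((server :: pool)[firstIdx pos i ((server :: pool).map pvWeight)]?).map
          (fun s => (sk + (firstIdx pos i ((server :: pool).map pvWeight) : Int), s)) := by
  intro pool
  induction pool with
  | nil =>
    intro server i sk hi hsum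
    simp only [List.map_cons, List.map_nil, List.sum_cons, List.sum_nil] at hsum
    have hmatch : pos < i + pvWeight server := by omega
    rw [getServerLoop]
    split_ifs with h1 h2
    · simp [firstIdx, hmatch]
    · exact absurd ⟨hi, hmatch⟩ h2
    · omega
  | cons s rest ih =>
    intro server i sk hi hsum
    rw [getServerLoop]
    split_ifs with h1 h2
    · have hc : pos < i + pvWeight server := h2.2
      simp [firstIdx, List.map_cons, hc]
    · have hc : ¬ pos < i + pvWeight server := by tauto
      have hsum' : (i + pvWeight server) + ((s :: rest).map pvWeight).sum = total := by
        simp only [List.map_cons, List.sum_cons] at hsum ⊢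
        omega
      have hrec := ih s (i + pvWeight server) (sk + 1) (by omega) hsum'
      simp only [hrec]
      have hfi : firstIdx pos i ((server :: s :: rest).map pvWeight)
          = firstIdx pos (i + pvWeight server) ((s :: rest).map pvWeight) + 1 := by
        simp [firstIdx, List.map_cons, hc]
      rw [hfi]
      simp only [List.getElem?_cons_succ]
      cases h : (s :: rest)[firstIdx pos (i + pvWeight server) ((s :: rest).map pvWeight)]? with
      | none => simp
      | some v => simp; ring_nf
    · omega

-- ===== VERDICT (by name: the statement is the Claim_ definition above) =====
theorem get_server_spec : Claim_equal_get_server := by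
  intro key pool _ hpre
  unfold Spec_get_server
  obtain ⟨hk, ht, hnn⟩ := hpre
  obtain ⟨a, b, c, d, t, hkl⟩ := four_chars key.toList hk
  have g0 : PySem.Str.pyGet? key 0 = some a := by
    rw [show (0 : Int) = ((0 : Nat) : Int) by norm_num, PySem.Str.pyGet?_natCast, hkl]; rfl
  have g1 : PySem.Str.pyGet? key 1 = some b := by
    rw [show (1 : Int) = ((1 : Nat) : Int) by norm_num, PySem.Str.pyGet?_natCast, hkl]; rfl
  have g2 : PySem.Str.pyGet? key 2 = some c := by
    rw [show (2 : Int) = ((2 : Nat) : Int) by norm_num, PySem.Str.pyGet?_natCast, hkl]; rfl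
  have g3 : PySem.Str.pyGet? key 3 = some d := by
    rw [show (3 : Int) = ((3 : Nat) : Int) by norm_num, PySem.Str.pyGet?_natCast, hkl]; rfl
  have e1 : PySem.List.pyRange 3 (-1) (-1) = [3, 2, 1, 0] := by decide
  have e2 : PySem.List.pyRange 0 4 1 = [0, 1, 2, 3] := by decide
  have g0' : PySem.List.pyGet? key.toList 0 = some a := by simpa using g0
  have g1' : PySem.List.pyGet? key.toList 1 = some b := by simpa using g1
  have g2' : PySem.List.pyGet? key.toList 2 = some c := by simpa using g2
  have g3' : PySem.List.pyGet? key.toList 3 = some d := by simpa using g3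
  set P : Int := (a.toNat : Int) + (b.toNat : Int) * 2 ^ 8 + (c.toNat : Int) * 2 ^ 16 + (d.toNat : Int) * 2 ^ 24 with hP
  have hfA : (PySem.List.pyRange 3 (-1) (-1)).foldl
      (fun (acc : Option Int) i =>
        acc.bind (fun p => (PySem.Str.pyGet? key i).map (fun ch => p * 2 ^ 8 + (ch.toNat : Int))))
      (some 0) = some P := by
    rw [e1]
    simp [List.foldl, g0', g1', g2', g3', hP]
    ring
  have hfB : (PySem.List.pyRange 0 4 1).foldl
      (fun (acc : Option Int) i =>
        acc.bind (fun s => (PySem.Str.pyGet? key i).map (fun ch => s + (ch.toNat : Int) * 2 ^ (8 * i.toNat))))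
      (some 0) = some P := by
    rw [e2]
    simp [List.foldl, g0', g1', g2', g3', hP]
  set ws := pool.map (fun row => pvWeight row) with hws
  set total := ws.sum with htot
  have hwsnn : ∀ w ∈ ws, 0 ≤ w := by
    intro w hw
    rw [hws] at hw
    obtain ⟨row, hrow, rfl⟩ := List.mem_map.mp hw
    exact hnn row hrow
  have htpos : 0 < total := by
    have : 0 ≤ total := List.sum_nonneg hwsnn
    omega
  cases pool with
  | nil =>
    exfalso
    apply ht
    rw [htot, hws]
    simp
  | cons s0 rest =>
    have hlast : (pvCum 0 ws).getLast? = some total := by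
      have h := pvCum_getLast ws 0
      cases hv : (pvCum 0 ws).getLast? with
      | none =>
        exfalso
        rw [hv] at h
        simp at h
        rw [hws] at hv
        simp [pvCum] at hv
      | some v =>
        rw [hv] at h
        simp at h
        rw [h]
    simp only [get_server, get_server_alt, hfA, hfB, ← hws, ← htot, hlast, if_neg ht]
    set pos := PySem.Int.mod P total with hpos
    have hmod : pos = P % total := by rw [hpos, PySem.Int.mod_eq_emod_of_pos htpos]
    have hpos0 : 0 ≤ pos := by rw [hmod]; exact Int.emod_nonneg _ (by omega)
    have hposlt : pos < total := by rw [hmod]; exact Int.emod_lt_of_pos _ htpos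
    obtain ⟨hbis, hblt⟩ := B_loc pos ws hwsnn hpos0 (htot ▸ hposlt)
    have hwseq : ws = (s0 :: rest).map pvWeight := by rw [hws]
    have hA := loopA pos total hposlt rest s0 0 0 hpos0 (by rw [← hwseq]; omega)
    rw [hA, hbis]
    set n := firstIdx pos 0 ws with hn
    have hlt : n < (s0 :: rest).length := by
      have : ws.length = (s0 :: rest).length := by rw [hwseq]; simp
      omega
    rw [PySem.List.pyGet?_natCast]
    have hget : (s0 :: rest)[n]? = some ((s0 :: rest)[n]'hlt) := List.getElem?_eq_getElem hlt
    rw [hget]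
    simp
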